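-- pv_equiv track=rewrite | github.com/olsenw/LeetCodeExercises | Python3/distribute_candies_amoung_children_II.py | distributeCandies_wrong
-- ===== SOURCE A (Python) =====
-- import math
--
-- def distributeCandies_wrong(n: int, limit: int) -> int:
--     # https://math.stackexchange.com/questions/5016883/calculate-ways-to-split-n-identical-items-into-m-groups-that-may-be-empty
--     # the math
--     answer = 0
--     for i in range(min(n, limit + 1)):
--         # give child one i candies (x candies remain)
--         x = n - i
--         # unable to split all candy between two children
--         if x > 2 * limit:
--             continue
--         # need to spilt the x candies between two children
--         y = (2 * limit) - x
--         answer += math.factorial(y + 1) // math.factorial(y)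
--     return answer
-- ===== SOURCE B (Python) =====
-- def distributeCandies_wrong(n: int, limit: int) -> int:
--     # Closed-form arithmetic-series sum over the valid i-interval: O(1) instead of O(min(n, limit)).
--     m = min(n, limit + 1)
--     lo = max(0, n - 2 * limit)
--     if lo >= m:
--         return 0
--     k = m - lo
--     return k * (2 * limit - n + 1) + k * (lo + m - 1) // 2
-- ===== Notes on version B (the rewrite author's own statement) =====
-- stated objective: faster
-- what changed: Replaced the O(min(n,limit)) loop (whose addend factorial(y+1)//factorial(y) is just y+1) by a closed-form arithmetic-series sum over the valid i-interval.
import Mathlib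
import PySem

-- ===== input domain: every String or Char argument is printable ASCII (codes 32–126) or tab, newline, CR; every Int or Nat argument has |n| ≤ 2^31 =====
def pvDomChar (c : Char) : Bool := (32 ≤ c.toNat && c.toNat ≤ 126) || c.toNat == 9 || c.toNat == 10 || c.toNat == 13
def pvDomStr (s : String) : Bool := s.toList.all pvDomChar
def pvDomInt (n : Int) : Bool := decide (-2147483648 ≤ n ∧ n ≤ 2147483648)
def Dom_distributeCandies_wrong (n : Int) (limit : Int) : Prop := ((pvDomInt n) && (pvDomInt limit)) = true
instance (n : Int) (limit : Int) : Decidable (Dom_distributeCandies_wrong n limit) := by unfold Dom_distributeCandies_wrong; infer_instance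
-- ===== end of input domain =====

-- B replaces A's loop (whose addend factorial(y+1)//factorial(y) is y+1) by a closed-form
-- arithmetic-series sum over the valid i-interval; return values proved equal on all inputs.

-- ===== PORT A =====
-- math.factorial: exact for k ≥ 0 (A only calls it with y ≥ 0, guaranteed by the 'continue' guard)
def pyFactorial (k : Int) : Int := (Nat.factorial k.toNat : Int)

def distributeCandies_wrong (n : Int) (limit : Int) : Int :=
  (PySem.List.pyRange 0 (min n (limit + 1)) 1).foldl
    (fun answer i =>
      let x := n - i
      if x > 2 * limit then answer
      else
        let y := (2 * limit) - x
        answer + PySem.Int.floordiv (pyFactorial (y + 1)) (pyFactorial y)) 0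

-- ===== PORT B =====
def distributeCandies_wrong_alt (n : Int) (limit : Int) : Int :=
  let m := min n (limit + 1)
  let lo := max 0 (n - 2 * limit)
  if lo ≥ m then 0
  else
    let k := m - lo
    k * (2 * limit - n + 1) + PySem.Int.floordiv (k * (lo + m - 1)) 2

-- ===== PRECONDITION & SPEC =====
def Spec_distributeCandies_wrong (n : Int) (limit : Int) (out : Int) : Prop := out = distributeCandies_wrong_alt n limit
instance (n : Int) (limit : Int) (out : Int) : Decidable (Spec_distributeCandies_wrong n limit out) := by unfold Spec_distributeCandies_wrong; infer_instance

-- ===== CLAIM (what is proved, stated in full; the proofs are below) =====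
def Claim_equal_distributeCandies_wrong : Prop := ∀ (n : Int) (limit : Int), Dom_distributeCandies_wrong n limit → Spec_distributeCandies_wrong n limit (distributeCandies_wrong n limit)

-- ===== LEMMAS AND PROOFS =====

-- factorial(y+1) // factorial(y) = y + 1 for y ≥ 0
lemma fact_ratio (y : Int) (hy : 0 ≤ y) :
    PySem.Int.floordiv (pyFactorial (y + 1)) (pyFactorial y) = y + 1 := by
  have hpos : (0 : Int) < (Nat.factorial y.toNat : Int) := by exact_mod_cast Nat.factorial_pos _
  have h1 : (y + 1).toNat = y.toNat + 1 := by omega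
  rw [PySem.Int.floordiv_eq_ediv_of_pos (b := pyFactorial y) (by simpa [pyFactorial] using hpos)]
  unfold pyFactorial
  rw [h1, Nat.factorial_succ]
  push_cast
  rw [show ((y.toNat : Int) + 1) * (Nat.factorial y.toNat : Int)
        = (y + 1) * (Nat.factorial y.toNat : Int) by
      congr 1; omega]
  exact Int.mul_ediv_cancel _ (by omega)

-- the closed form the loop computes up to bound M (k clamped at 0, so no case split)
def loopSum (n limit : Int) (M : Int) : Int :=
  max 0 (M - max 0 (n - 2 * limit)) * (2 * limit - n + 1)
    + (max 0 (M - max 0 (n - 2 * limit)) * (max 0 (n - 2 * limit) + M - 1)) / 2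

lemma loop_eq (n limit : Int) (M : Nat) (acc : Int) :
    (PySem.List.pyRange 0 (M : Int) 1).foldl
      (fun answer i =>
        let x := n - i
        if x > 2 * limit then answer
        else
          let y := (2 * limit) - x
          answer + PySem.Int.floordiv (pyFactorial (y + 1)) (pyFactorial y)) acc
    = acc + loopSum n limit (M : Int) := by
  induction M generalizing acc with
  | zero =>
      rw [PySem.List.pyRange_one_eq_nil (by norm_num)]
      simp [loopSum]
  | succ M ih =>
      have hsplit : PySem.List.pyRange 0 ((M : Int) + 1) 1
          = PySem.List.pyRange 0 (M : Int) 1 ++ [(M : Int)] :=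
        PySem.List.pyRange_one_succ_right (by positivity)
      push_cast
      rw [hsplit, List.foldl_append, ih]
      simp only [List.foldl_cons, List.foldl_nil]
      unfold loopSum
      by_cases h : n - (M : Int) > 2 * limit
      · rw [if_pos h]
        have h1 : max 0 ((M : Int) - max 0 (n - 2 * limit)) = 0 := by omega
        have h2 : max 0 ((M : Int) + 1 - max 0 (n - 2 * limit)) = 0 := by omega
        rw [h1, h2]
        norm_num
      · rw [if_neg h]
        have hy : (0 : Int) ≤ 2 * limit - (n - (M : Int)) := by omega
        rw [fact_ratio _ hy]
        have h1 : max 0 ((M : Int) - max 0 (n - 2 * limit))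
            = (M : Int) - max 0 (n - 2 * limit) := by omega
        have h2 : max 0 ((M : Int) + 1 - max 0 (n - 2 * limit))
            = (M : Int) + 1 - max 0 (n - 2 * limit) := by omega
        rw [h1, h2]
        have hdiv : (((M : Int) + 1 - max 0 (n - 2 * limit)) * (max 0 (n - 2 * limit) + ((M : Int) + 1) - 1)) / 2
            = (((M : Int) - max 0 (n - 2 * limit)) * (max 0 (n - 2 * limit) + (M : Int) - 1)) / 2 + (M : Int) := by
          have he : ((M : Int) + 1 - max 0 (n - 2 * limit)) * (max 0 (n - 2 * limit) + ((M : Int) + 1) - 1)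
              = ((M : Int) - max 0 (n - 2 * limit)) * (max 0 (n - 2 * limit) + (M : Int) - 1) + (M : Int) * 2 := by
            ring
          rw [he, Int.add_mul_ediv_right _ _ (by norm_num : (2:Int) ≠ 0)]
        rw [hdiv]
        ring

theorem distributeCandies_wrong_eq (n limit : Int) :
    distributeCandies_wrong n limit = distributeCandies_wrong_alt n limit := by
  unfold distributeCandies_wrong distributeCandies_wrong_alt
  by_cases hm : min n (limit + 1) ≤ 0
  · rw [PySem.List.pyRange_one_eq_nil hm]
    simp only [List.foldl_nil]
    rw [if_pos (by omega)]
  · have hM : ((min n (limit + 1)).toNat : Int) = min n (limit + 1) := by omega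
    rw [← hM, loop_eq, hM]
    unfold loopSum
    dsimp only
    by_cases hlo : max 0 (n - 2 * limit) ≥ min n (limit + 1)
    · rw [if_pos hlo]
      have h1 : max 0 (min n (limit + 1) - max 0 (n - 2 * limit)) = 0 := by omega
      rw [h1]
      norm_num
    · rw [if_neg hlo]
      rw [PySem.Int.floordiv_eq_ediv_of_pos (by norm_num : (0:Int) < 2)]
      have h1 : max 0 (min n (limit + 1) - max 0 (n - 2 * limit))
          = min n (limit + 1) - max 0 (n - 2 * limit) := by omega
      rw [h1]
      ring_nf

-- ===== VERDICT (by name: the statement is the Claim_ definition above) =====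
theorem distributeCandies_wrong_spec : Claim_equal_distributeCandies_wrong := by
  intro n limit _
  exact distributeCandies_wrong_eq n limit
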